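-- pv_equiv track=rewrite | github.com/Franciscoafonseca/Projeto-Contracao_Bases_De_Crencas | logica/contraction.py | selecionar_remainders
-- ===== SOURCE A (Python) =====
-- from typing import List, Set
--
-- def selecionar_remainders(
--     rems: List[List[str]],
--     estrategia: str = "full",
-- ) -> List[List[str]]:
--     """
--     Função de seleção γ para Partial Meet.
--
--     Estratégias:
--     - full:
--         seleciona todos os remainders.
--     - first:
--         seleciona apenas o primeiro remainder.
--     - max_cardinality:
--         seleciona todos os remainders com maior cardinalidade.
--     """
--     if not rems:
--         return []
--
--     if estrategia == "first":
--         return [rems[0]]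
--
--     if estrategia == "max_cardinality":
--         maior = max(len(r) for r in rems)
--         return [r for r in rems if len(r) == maior]
--
--     # full meet por defeito
--     return rems
-- ===== SOURCE B (Python) =====
-- from typing import List
--
-- def selecionar_remainders(
--     rems: List[List[str]],
--     estrategia: str = "full",
-- ) -> List[List[str]]:
--     if not rems:
--         return []
--     if estrategia == "first":
--         return [rems[0]]
--     if estrategia == "max_cardinality":
--         maior = -1
--         selecionados = []
--         for r in rems:
--             n = len(r)
--             if n > maior:
--                 maior = n
--                 selecionados = [r]
--             elif n == maior:
--                 selecionados.append(r)
--         return selecionados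
--     return rems
-- ===== Notes on version B (the rewrite author's own statement) =====
-- stated objective: alternative
-- what changed: The max_cardinality branch's two passes (max of lengths, then filter by that max) are fused into one scan maintaining the running maximum and the list of current best remainders.
import Mathlib
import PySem

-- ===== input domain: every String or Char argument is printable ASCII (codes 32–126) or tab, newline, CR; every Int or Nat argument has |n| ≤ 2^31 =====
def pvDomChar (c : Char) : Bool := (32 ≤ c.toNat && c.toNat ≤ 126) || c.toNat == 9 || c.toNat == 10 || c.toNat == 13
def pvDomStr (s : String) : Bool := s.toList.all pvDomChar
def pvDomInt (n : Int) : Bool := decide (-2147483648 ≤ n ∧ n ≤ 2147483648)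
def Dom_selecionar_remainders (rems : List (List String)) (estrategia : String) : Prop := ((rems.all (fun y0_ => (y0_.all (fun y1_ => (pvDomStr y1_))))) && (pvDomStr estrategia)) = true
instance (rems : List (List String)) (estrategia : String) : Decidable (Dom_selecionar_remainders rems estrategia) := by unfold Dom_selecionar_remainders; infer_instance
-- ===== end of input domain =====

-- B fuses A's two-pass max_cardinality branch (max of lengths, then filter) into one
-- scan maintaining the running maximum and the current best remainders (objective: alternative).

-- ===== PORT A =====
def selecionar_remainders (rems : List (List String)) (estrategia : String) : List (List String) :=
  match rems with
  | [] => []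
  | x :: xs =>
    if estrategia = "first" then [x]
    else if estrategia = "max_cardinality" then
      -- max(len(r) for r in rems): Python's max over a nonempty sequence
      let maior := xs.foldl (fun m r => max m r.length) x.length
      (x :: xs).filter (fun r => r.length == maior)
    else x :: xs

-- ===== PORT B =====
def altStep (st : Int × List (List String)) (r : List String) : Int × List (List String) :=
  let n : Int := (r.length : Int)
  if n > st.1 then (n, [r])
  else if n = st.1 then (st.1, st.2 ++ [r])
  else st

def selecionar_remainders_alt (rems : List (List String)) (estrategia : String) : List (List String) :=
  match rems with
  | [] => []
  | x :: xs =>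
    if estrategia = "first" then [x]
    else if estrategia = "max_cardinality" then
      (List.foldl altStep (-1, []) (x :: xs)).2
    else x :: xs

-- ===== PRECONDITION & SPEC =====
def Spec_selecionar_remainders (rems : List (List String)) (estrategia : String) (out : List (List String)) : Prop := out = selecionar_remainders_alt rems estrategia
instance (rems : List (List String)) (estrategia : String) (out : List (List String)) : Decidable (Spec_selecionar_remainders rems estrategia out) := by unfold Spec_selecionar_remainders; infer_instance

-- ===== CLAIM (what is proved, stated in full; the proofs are below) =====
def Claim_equal_selecionar_remainders : Prop := ∀ (rems : List (List String)) (estrategia : String), Dom_selecionar_remainders rems estrategia → Spec_selecionar_remainders rems estrategia (selecionar_remainders rems estrategia)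

-- ===== LEMMAS AND PROOFS =====

def maxI (m : Int) (l : List (List String)) : Int :=
  List.foldl (fun a (r : List String) => max a (r.length : Int)) m l

theorem le_maxI (l : List (List String)) (m : Int) : m ≤ maxI m l := by
  induction l generalizing m with
  | nil => simp [maxI]
  | cons x xs ih =>
    calc m ≤ max m (x.length : Int) := le_max_left _ _
    _ ≤ maxI (max m (x.length : Int)) xs := ih _
    _ = maxI m (x :: xs) := rfl

theorem maxI_cast (l : List (List String)) (k : Nat) :
    maxI (k : Int) l = ((List.foldl (fun a (r : List String) => max a r.length) k l : Nat) : Int) := by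
  induction l generalizing k with
  | nil => simp [maxI]
  | cons x xs ih =>
    have : max (k : Int) (x.length : Int) = ((max k x.length : Nat) : Int) := by
      push_cast; rfl
    simp only [maxI, List.foldl] at *
    rw [this, ih]

theorem altStep_foldl (l : List (List String)) (m : Int) (s : List (List String)) :
    List.foldl altStep (m, s) l =
      (maxI m l,
       (if m = maxI m l then s else []) ++
         l.filter (fun r => (r.length : Int) == maxI m l)) := by
  induction l generalizing m s with
  | nil => simp [maxI]
  | cons x xs ih =>
    have hM : maxI m (x :: xs) = maxI (max m (x.length : Int)) xs := rfl
    simp only [List.foldl, altStep]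
    by_cases h1 : (x.length : Int) > m
    · simp only [if_pos h1]
      rw [ih]
      have hmx : max m (x.length : Int) = (x.length : Int) := max_eq_right (le_of_lt h1)
      have hle : (x.length : Int) ≤ maxI (x.length : Int) xs := le_maxI _ _
      have hmne : ¬ m = maxI (x.length : Int) xs :=
        ne_of_lt (lt_of_lt_of_le h1 hle)
      rw [hM, hmx, if_neg hmne, List.nil_append, List.filter_cons]
      by_cases hx : (x.length : Int) = maxI (x.length : Int) xs
      · rw [if_pos hx]
        have hb : ((x.length : Int) == maxI (x.length : Int) xs) = true := beq_iff_eq.mpr hx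
        rw [hb]
        simp
      · rw [if_neg hx]
        have hb : ((x.length : Int) == maxI (x.length : Int) xs) = false :=
          beq_eq_false_iff_ne.mpr hx
        rw [hb]
        simp
    · simp only [if_neg h1]
      have hge : (x.length : Int) ≤ m := le_of_not_gt h1
      by_cases h2 : (x.length : Int) = m
      · simp only [if_pos h2]
        rw [ih]
        have hmx : max m (x.length : Int) = m := max_eq_left hge
        rw [hM, hmx, List.filter_cons]
        by_cases hm : m = maxI m xs
        · have hb : ((x.length : Int) == maxI m xs) = true := by
            rw [beq_iff_eq, h2, ← hm]
          rw [if_pos hm, if_pos hm, hb]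
          simp
        · have hb : ((x.length : Int) == maxI m xs) = false := by
            rw [beq_eq_false_iff_ne, h2]; exact hm
          rw [if_neg hm, if_neg hm, hb]
          simp
      · simp only [if_neg h2]
        rw [ih]
        have hlt : (x.length : Int) < m := lt_of_le_of_ne hge h2
        have hmx : max m (x.length : Int) = m := max_eq_left (le_of_lt hlt)
        rw [hM, hmx, List.filter_cons]
        have hb : ((x.length : Int) == maxI m xs) = false :=
          beq_eq_false_iff_ne.mpr (ne_of_lt (lt_of_lt_of_le hlt (le_maxI _ _)))
        rw [hb]
        simp

-- ===== VERDICT (by name: the statement is the Claim_ definition above) =====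
theorem selecionar_remainders_spec : Claim_equal_selecionar_remainders := by
  intro rems estrategia _
  unfold Spec_selecionar_remainders selecionar_remainders selecionar_remainders_alt
  cases rems with
  | nil => rfl
  | cons x xs =>
    dsimp only
    by_cases hf : estrategia = "first"
    · simp [hf]
    · by_cases hm : estrategia = "max_cardinality"
      · rw [if_neg hf, if_neg hf, if_pos hm, if_pos hm]
        have h0 : List.foldl altStep (-1, ([] : List (List String))) (x :: xs) =
            List.foldl altStep ((x.length : Int), [x]) xs := by
          have hs : altStep (-1, ([] : List (List String))) x = ((x.length : Int), [x]) := by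
            simp only [altStep]
            rw [if_pos (by omega : ((x.length : Int)) > -1)]
          simp [List.foldl, hs]
        rw [h0, altStep_foldl]
        set maiorN := List.foldl (fun m (r : List String) => max m r.length) x.length xs with hmn
        have hcast : maxI (x.length : Int) xs = (maiorN : Int) := maxI_cast xs x.length
        rw [hcast]
        have hfeq : ∀ r : List String, ((r.length : Int) == (maiorN : Int)) = (r.length == maiorN) := by
          intro r
          by_cases h : r.length = maiorN
          · simp [h]
          · have : ¬ ((r.length : Int) = (maiorN : Int)) := by exact_mod_cast h
            simp [h, this]
        rw [show (List.filter (fun r => (r.length : Int) == (maiorN : Int)) xs)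
              = List.filter (fun r => r.length == maiorN) xs from
            List.filter_congr (fun r _ => hfeq r)]
        by_cases hxm : x.length = maiorN
        · simp [hxm]
        · have hc : ¬ ((x.length : Int) = (maiorN : Int)) := by exact_mod_cast hxm
          simp [hxm, hc]
      · simp [hf, hm]
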